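-- pv_equiv track=rewrite | github.com/SV-Denis/sat-comparison | the solver/SAT_solver.py | unrelevant_clauses
-- ===== SOURCE A (Python) =====
-- def unrelevant_clauses(new_clause, clauses, seen):
--     for clause in clauses:
--         if clause.issubset(new_clause):
--             return True
--     for clause in clauses:
--         if clause.issubset(seen):
--             return True
--     return False
-- ===== SOURCE B (Python) =====
-- def unrelevant_clauses(new_clause, clauses, seen):
--     return any(c.issubset(new_clause) or c.issubset(seen) for c in clauses)
-- ===== Notes on version B (the rewrite author's own statement) =====
-- stated objective: simpler
-- what changed: Fuses A's two sequential scans of clauses into a single any() pass testing each clause against new_clause and seen at once.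
import Mathlib
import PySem

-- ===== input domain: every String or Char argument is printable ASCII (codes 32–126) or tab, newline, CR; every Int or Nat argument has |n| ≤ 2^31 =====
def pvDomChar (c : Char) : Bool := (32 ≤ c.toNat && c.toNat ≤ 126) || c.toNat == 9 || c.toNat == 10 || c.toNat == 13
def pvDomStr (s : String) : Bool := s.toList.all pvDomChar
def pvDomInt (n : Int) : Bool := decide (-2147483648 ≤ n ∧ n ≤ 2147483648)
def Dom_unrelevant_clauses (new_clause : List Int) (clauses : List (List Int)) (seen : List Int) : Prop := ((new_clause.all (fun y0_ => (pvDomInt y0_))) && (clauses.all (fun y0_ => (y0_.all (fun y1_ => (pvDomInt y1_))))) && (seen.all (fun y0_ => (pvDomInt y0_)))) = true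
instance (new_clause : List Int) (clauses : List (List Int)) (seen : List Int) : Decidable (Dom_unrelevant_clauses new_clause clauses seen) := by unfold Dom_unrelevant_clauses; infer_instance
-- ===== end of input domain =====

-- B fuses A's two sequential scans of `clauses` into a single `any` pass; objective: simpler.

-- ===== PORT A =====
-- clause.issubset(other): every element of clause occurs in other
def ucSubset (c other : List Int) : Bool := c.all (fun x => other.contains x)

-- one 'for clause in clauses: if clause.issubset(target): return True' loop of A
def ucLoop (clauses : List (List Int)) (target : List Int) : Bool :=
  match clauses with
  | [] => false
  | c :: rest => if ucSubset c target then true else ucLoop rest target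

def unrelevant_clauses (new_clause : List Int) (clauses : List (List Int)) (seen : List Int) : Bool :=
  if ucLoop clauses new_clause then true
  else ucLoop clauses seen

-- ===== PORT B =====
def ucIssubset (c other : List Int) : Bool := c.all (fun x => other.contains x)

def unrelevant_clauses_alt (new_clause : List Int) (clauses : List (List Int)) (seen : List Int) : Bool :=
  clauses.any (fun c => ucIssubset c new_clause || ucIssubset c seen)

-- ===== PRECONDITION & SPEC =====
def Spec_unrelevant_clauses (new_clause : List Int) (clauses : List (List Int)) (seen : List Int) (out : Bool) : Prop := out = unrelevant_clauses_alt new_clause clauses seen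
instance (new_clause : List Int) (clauses : List (List Int)) (seen : List Int) (out : Bool) : Decidable (Spec_unrelevant_clauses new_clause clauses seen out) := by unfold Spec_unrelevant_clauses; infer_instance

-- ===== CLAIM (what is proved, stated in full; the proofs are below) =====
def Claim_equal_unrelevant_clauses : Prop := ∀ (new_clause : List Int) (clauses : List (List Int)) (seen : List Int), Dom_unrelevant_clauses new_clause clauses seen → Spec_unrelevant_clauses new_clause clauses seen (unrelevant_clauses new_clause clauses seen)

-- ===== LEMMAS AND PROOFS =====
-- A's loop over a target equals one `any` of the subset test against that target
theorem ucLoop_eq_any (clauses : List (List Int)) (target : List Int) :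
    ucLoop clauses target = clauses.any (fun c => ucSubset c target) := by
  induction clauses with
  | nil => rfl
  | cons c rest ih =>
      by_cases h : ucSubset c target = true <;> simp [ucLoop, List.any_cons, ih, h]

-- `any` of a disjunction splits into two `any`s
theorem any_or_split (l : List (List Int)) (p q : List Int → Bool) :
    l.any (fun c => p c || q c) = (l.any p || l.any q) := by
  induction l with
  | nil => rfl
  | cons c rest ih =>
      simp only [List.any_cons, ih]
      cases p c <;> cases q c <;> cases rest.any p <;> cases rest.any q <;> rfl

-- the fused scan equals A's two scans
theorem fused_eq (new_clause : List Int) (clauses : List (List Int)) (seen : List Int) :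
    unrelevant_clauses new_clause clauses seen = unrelevant_clauses_alt new_clause clauses seen := by
  unfold unrelevant_clauses unrelevant_clauses_alt
  rw [ucLoop_eq_any, ucLoop_eq_any, any_or_split]
  have he : ucIssubset = ucSubset := rfl
  rw [he]
  cases h : clauses.any (fun c => ucSubset c new_clause) <;> simp [h]

-- ===== VERDICT (by name: the statement is the Claim_ definition above) =====
theorem unrelevant_clauses_spec : Claim_equal_unrelevant_clauses := by
  intro nc cs sn _
  unfold Spec_unrelevant_clauses
  exact fused_eq nc cs sn
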